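-- pv_equiv track=rewrite | github.com/saeed-amiri/analysing-legacy | codes/trajectory_residue_extractor.py | check_similar_items
-- ===== SOURCE A (Python) =====
-- import typing
--
-- def check_similar_items(dic: dict[str, list[int]]) -> bool:
--     """
--     Create an empty set to store all unique elements
--     """
--     unique_elements: set[typing.Any] = set()
--
--     # Iterate over the lists in the dictionary values
--     for lst in dic.values():
--         # Convert the list to a set to remove duplicates
--         unique_set = set(lst)
--
--         # Check if there are any common elements with the previous sets
--         if unique_set & unique_elements:
--             return True
--         # Update the set of unique elements
--         unique_elements |= unique_set
--
--     # If no common elements were found, return False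
--     return False
-- ===== SOURCE B (Python) =====
-- def check_similar_items(dic: dict[str, list[int]]) -> bool:
--     vals = list(dic.values())
--     total = sum(len(set(lst)) for lst in vals)
--     union = set().union(*vals)
--     return total != len(union)
-- ===== Notes on version B (the rewrite author's own statement) =====
-- stated objective: simpler
-- what changed: Replaces the incremental running-set loop with early return by a counting argument: sum of per-list distinct counts differs from the size of the union of all lists exactly when some element is shared.
import Mathlib
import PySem

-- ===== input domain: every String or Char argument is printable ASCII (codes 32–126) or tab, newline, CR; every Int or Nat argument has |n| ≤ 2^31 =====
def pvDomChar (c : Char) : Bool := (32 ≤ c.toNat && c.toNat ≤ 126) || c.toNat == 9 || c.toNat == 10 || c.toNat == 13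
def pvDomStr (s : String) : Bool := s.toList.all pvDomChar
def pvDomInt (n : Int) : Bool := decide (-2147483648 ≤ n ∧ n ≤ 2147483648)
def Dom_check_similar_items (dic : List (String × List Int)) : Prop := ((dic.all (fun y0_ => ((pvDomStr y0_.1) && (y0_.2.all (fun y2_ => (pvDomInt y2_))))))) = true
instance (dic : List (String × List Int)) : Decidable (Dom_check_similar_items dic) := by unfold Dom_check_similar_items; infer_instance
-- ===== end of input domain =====

-- B replaces A's running-set loop with early return by comparing the sum of per-list distinct counts with the size of the union (simpler; same cost).
-- ===== PORT A =====
-- the 'for lst in dic.values(): …' loop with its early 'return True'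
def checkA_loop : List (List Int) → PySem.Set Int → Bool
  | [], _ => false
  | lst :: rest, unique_elements =>
    let unique_set := PySem.Set.ofList lst
    -- 'if unique_set & unique_elements:' — truthiness of a set is nonemptiness
    if PySem.Set.inter unique_set unique_elements ≠ [] then true
    else checkA_loop rest (PySem.Set.union unique_elements unique_set)

def check_similar_items (dic : List (String × List Int)) : Bool :=
  checkA_loop (PySem.Dict.ofList dic).values PySem.Set.empty

-- ===== PORT B =====
def check_similar_items_alt (dic : List (String × List Int)) : Bool :=
  let vals := (PySem.Dict.ofList dic).values
  let total := (vals.map (fun lst => PySem.Set.len (PySem.Set.ofList lst))).sum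
  -- set().union(*vals)
  let union := vals.foldl (fun acc lst => PySem.Set.update acc lst) PySem.Set.empty
  decide (total ≠ PySem.Set.len union)

-- ===== PRECONDITION & SPEC =====
def Spec_check_similar_items (dic : List (String × List Int)) (out : Bool) : Prop := out = check_similar_items_alt dic
instance (dic : List (String × List Int)) (out : Bool) : Decidable (Spec_check_similar_items dic out) := by unfold Spec_check_similar_items; infer_instance

-- ===== CLAIM (what is proved, stated in full; the proofs are below) =====
def Claim_equal_check_similar_items : Prop := ∀ (dic : List (String × List Int)), Dom_check_similar_items dic → Spec_check_similar_items dic (check_similar_items dic)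

-- ===== LEMMAS AND PROOFS =====

-- length of s.update(l): s plus the new elements of l
theorem len_update (s : PySem.Set Int) (l : List Int) :
    (PySem.Set.update s l).length
      = s.length + ((PySem.Set.ofList l).filter (fun y => !(PySem.Set.contains s y))).length := by
  rw [PySem.Set.update_eq_append_filter]
  simp

theorem len_update_le (s : PySem.Set Int) (l : List Int) :
    (PySem.Set.update s l).length ≤ s.length + (PySem.Set.ofList l).length := by
  rw [len_update]
  have := List.length_filter_le (fun y => !(PySem.Set.contains s y)) (PySem.Set.ofList l)
  omega

theorem len_foldl_update_le (vals : List (List Int)) (acc : PySem.Set Int) :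
    (vals.foldl (fun a l => PySem.Set.update a l) acc).length
      ≤ acc.length + (vals.map (fun l => (PySem.Set.ofList l).length)).sum := by
  induction vals generalizing acc with
  | nil => simp
  | cons l rest ih =>
    simp only [List.foldl_cons, List.map_cons, List.sum_cons]
    have h1 := len_update_le acc l
    have h2 := ih (PySem.Set.update acc l)
    omega

theorem loopA_eq (vals : List (List Int)) (acc : PySem.Set Int) :
    checkA_loop vals acc
      = decide ((vals.map (fun l => (PySem.Set.ofList l).length)).sum + acc.length
          ≠ (vals.foldl (fun a l => PySem.Set.update a l) acc).length) := by
  induction vals generalizing acc with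
  | nil => simp [checkA_loop]
  | cons l rest ih =>
    simp only [checkA_loop, List.foldl_cons, List.map_cons, List.sum_cons]
    have hu : PySem.Set.union acc (PySem.Set.ofList l) = PySem.Set.update acc l := by
      show PySem.Set.update acc (PySem.Set.ofList l) = PySem.Set.update acc l
      rw [PySem.Set.update_eq_append_filter, PySem.Set.update_eq_append_filter,
        PySem.Set.ofList_ofList]
    by_cases h : PySem.Set.inter (PySem.Set.ofList l) acc ≠ []
    · -- overlap: A returns true; B's count is strictly short of the sum
      rw [if_pos h]
      obtain ⟨x, hxl, hxacc⟩ : ∃ x ∈ PySem.Set.ofList l, x ∈ acc := by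
        rcases List.exists_mem_of_ne_nil _ h with ⟨x, hx⟩
        exact ⟨x, ((PySem.Set.mem_inter _ _ _).mp hx).1, ((PySem.Set.mem_inter _ _ _).mp hx).2⟩
      have hstrict : (PySem.Set.update acc l).length < acc.length + (PySem.Set.ofList l).length := by
        rw [len_update]
        have : ((PySem.Set.ofList l).filter (fun y => !(PySem.Set.contains acc y))).length
            < (PySem.Set.ofList l).length := by
          apply List.length_filter_lt_length_iff_exists.mpr
          refine ⟨x, hxl, ?_⟩
          simpa using hxacc
        omega
      have hle := len_foldl_update_le rest (PySem.Set.update acc l)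
      symm
      rw [decide_eq_true_iff]
      omega
    · -- disjoint: lengths add exactly; apply the IH
      rw [if_neg h]
      rw [hu, ih]
      have heq : (PySem.Set.update acc l).length = acc.length + (PySem.Set.ofList l).length := by
        rw [len_update]
        have hall : ∀ y ∈ PySem.Set.ofList l, (fun y => !(PySem.Set.contains acc y)) y = true := by
          intro y hy
          by_contra hc
          have hyacc : y ∈ acc := by simpa using hc
          have hmem : y ∈ PySem.Set.inter (PySem.Set.ofList l) acc :=
            (PySem.Set.mem_inter _ _ _).mpr ⟨hy, hyacc⟩
          rw [not_not.mp h] at hmem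
          simp at hmem
        rw [List.filter_eq_self.mpr hall]
      rw [heq]
      apply decide_eq_decide.mpr
      omega

-- ===== VERDICT (by name: the statement is the Claim_ definition above) =====
theorem check_similar_items_spec : Claim_equal_check_similar_items := by
  intro dic _
  unfold Spec_check_similar_items check_similar_items check_similar_items_alt
  rw [loopA_eq]
  simp only [PySem.Set.len, PySem.Set.empty, List.length_nil, Nat.add_zero]
  rw [decide_eq_decide]
  have hcast : ((PySem.Dict.ofList dic).values.map
        (fun lst => ((PySem.Set.ofList lst).length : Int))).sum
      = (((PySem.Dict.ofList dic).values.map (fun l => (PySem.Set.ofList l).length)).sum : Int) := by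
    rw [Nat.cast_list_sum, List.map_map]
    rfl
  rw [hcast]
  constructor <;> intro hne hq <;> exact hne (by exact_mod_cast hq)
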